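-- pv_equiv track=rewrite | github.com/Rhysoshea/daily_coding_challenges | daily21.py | solution
-- ===== SOURCE A (Python) =====
-- def solution(input):
--     #O(N^2) time due to running through every class row every time N*N
--     counter_per_class = [1]*len(input)
--
--     for i,time in enumerate(input):
--         count1 = 1
--         count2 = 1
--         for j in range(0,len(input)):
--             if j!=i:
--                 # print (f'time1 {time}  time2  {input[j]}')
--                 if time[0] > input[j][0] and time[0] < input[j][1]:
--                     count1 += 1
--                 if time[1] > input[j][0] and time[1] < input[j][1]:
--                     count2 += 1
--                 # print (f'count1 {count1} count2 {count2}')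
--                 counter_per_class[j] = max(counter_per_class[j],max(count1,count2))
--     # print (counter_per_class)
--
--     return max(counter_per_class)
-- ===== SOURCE B (Python) =====
-- def _bisect_left(a, x):
--     # hand-written since no imports are allowed: first index with a[idx] >= x
--     lo, hi = 0, len(a)
--     while lo < hi:
--         mid = (lo + hi) // 2
--         if a[mid] < x:
--             lo = mid + 1
--         else:
--             hi = mid
--     return lo
--
-- def _bisect_right(a, x):
--     # first index with a[idx] > x
--     lo, hi = 0, len(a)
--     while lo < hi:
--         mid = (lo + hi) // 2
--         if x < a[mid]:
--             hi = mid
--         else: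
--             lo = mid + 1
--     return lo
--
-- def solution(input):
--     # Sort starts and ends of the proper intervals once; the number of intervals
--     # strictly containing an endpoint x is (#starts < x) - (#ends <= x).
--     starts = sorted(r[0] for r in input if r[0] < r[1])
--     ends = sorted(r[1] for r in input if r[0] < r[1])
--     best = 0
--     for r in input:
--         for x in (r[0], r[1]):
--             c = _bisect_left(starts, x) - _bisect_right(ends, x)
--             if c > best:
--                 best = c
--     return best + 1
-- ===== Notes on version B (the rewrite author's own statement) =====
-- stated objective: faster
-- what changed: Replaces the quadratic double loop with running-max bookkeeping by sorting the starts and ends of the proper intervals once and counting, for each endpoint x, the intervals strictly containing it as (#starts < x) - (#ends <= x) via binary search.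
-- outside the precondition, e.g. on solution([[]]): A returns 1, B raises IndexError
import Mathlib
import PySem

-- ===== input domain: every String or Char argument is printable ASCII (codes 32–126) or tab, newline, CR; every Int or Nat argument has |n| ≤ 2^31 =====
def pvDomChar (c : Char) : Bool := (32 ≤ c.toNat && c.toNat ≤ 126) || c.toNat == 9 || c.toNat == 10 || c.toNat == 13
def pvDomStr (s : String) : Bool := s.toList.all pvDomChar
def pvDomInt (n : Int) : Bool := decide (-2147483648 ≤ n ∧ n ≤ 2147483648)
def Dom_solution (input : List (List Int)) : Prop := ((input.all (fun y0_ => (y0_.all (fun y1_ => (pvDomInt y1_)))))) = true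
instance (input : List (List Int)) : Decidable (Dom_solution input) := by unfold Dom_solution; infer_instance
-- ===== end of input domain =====

-- B replaces A's quadratic double loop by sorting the proper intervals' starts and ends once and
-- counting, per endpoint x, the intervals strictly containing x as (#starts < x) - (#ends <= x)
-- by binary search (objective: faster, O(n log n) vs O(n^2)).

-- ===== PORT A =====
-- r[k] / input[j]: every index used by A is in range under Pre_solution, so the total pyGetD form is exact there
def pvGetI (r : List Int) (k : Int) : Int := PySem.List.pyGetD r k 0
def pvRow (input : List (List Int)) (j : Int) : List Int := PySem.List.pyGetD input j []

-- body of A's inner `for j in range(0, len(input))` loop; state = (count1, count2, counter_per_class)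
def pvStepA (input : List (List Int)) (time : List Int) (i : Int)
    (st : Int × Int × List Int) (j : Int) : Int × Int × List Int :=
  if j ≠ i then
    let count1 := if pvGetI time 0 > pvGetI (pvRow input j) 0 ∧ pvGetI time 0 < pvGetI (pvRow input j) 1 then st.1 + 1 else st.1
    let count2 := if pvGetI time 1 > pvGetI (pvRow input j) 0 ∧ pvGetI time 1 < pvGetI (pvRow input j) 1 then st.2.1 + 1 else st.2.1
    (count1, count2, PySem.List.pySetD st.2.2 j (max (PySem.List.pyGetD st.2.2 j 0) (max count1 count2)))
  else st

def solution (input : List (List Int)) : Int :=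
  let counter :=
    (PySem.List.enumerate input 0).foldl
      (fun counter it =>
        ((PySem.List.pyRange 0 (input.length : Int) 1).foldl (pvStepA input it.2 it.1) (1, 1, counter)).2.2)
      (List.replicate input.length (1 : Int))
  -- max(counter_per_class): ValueError on [] is excluded by Pre_solution; .getD 0 is never reached there
  (PySem.List.max? counter (fun y => y)).getD 0

-- ===== PORT B =====
def solution_alt (input : List (List Int)) : Int :=
  let starts := PySem.List.sorted ((input.filter (fun r => pvGetI r 0 < pvGetI r 1)).map (fun r => pvGetI r 0)) (fun x => x) false
  let ends := PySem.List.sorted ((input.filter (fun r => pvGetI r 0 < pvGetI r 1)).map (fun r => pvGetI r 1)) (fun x => x) false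
  let best := input.foldl
    (fun best r =>
      [pvGetI r 0, pvGetI r 1].foldl
        (fun best x =>
          let c : Int := (PySem.List.bisectLeft starts x : Int) - (PySem.List.bisectRight ends x : Int)
          if c > best then c else best)
        best)
    0
  best + 1

-- ===== PRECONDITION & SPEC =====
-- Pre_ excludes the empty list (A raises ValueError) and rows with fewer than 2 elements: on those
-- A raises IndexError whenever len(input) >= 2, and on a single short row (where A returns 1 without
-- ever indexing it) B itself raises IndexError, so such rows stay outside the claim.
def Pre_solution (input : List (List Int)) : Prop := input ≠ [] ∧ ∀ r ∈ input, 2 ≤ r.length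
instance (input : List (List Int)) : Decidable (Pre_solution input) := by unfold Pre_solution; infer_instance
def pvWitness_solution : List (List Int) := [[0, 3], [1, 4]]

def Spec_solution (input : List (List Int)) (out : Int) : Prop := out = solution_alt input
instance (input : List (List Int)) (out : Int) : Decidable (Spec_solution input out) := by unfold Spec_solution; infer_instance

-- ===== CLAIM (what is proved, stated in full; the proofs are below) =====
def Claim_equal_solution : Prop := ∀ (input : List (List Int)), Dom_solution input → Pre_solution input → Spec_solution input (solution input)

-- ===== LEMMAS AND PROOFS =====

-- number of intervals of `input` strictly containing x
def pvC (input : List (List Int)) (x : Int) : Nat :=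
  input.countP (fun r => decide (pvGetI r 0 < x) && decide (x < pvGetI r 1))

-- all endpoints, and the maximal containment count over them
def pvEnds (input : List (List Int)) : List Int := input.flatMap (fun r => [pvGetI r 0, pvGetI r 1])
def pvBig (input : List (List Int)) : Int :=
  (pvEnds input).foldl (fun m x => max m ((pvC input x : Nat) : Int)) 0

theorem countP_prefix {p : Int → Bool} (xs : List Int) (r : Nat) (hr : r ≤ xs.length)
    (h : ∀ (j : Nat) (hj : j < xs.length), p xs[j] ↔ j < r) : xs.countP p = r := by
  induction xs generalizing r with
  | nil => simp only [List.length_nil] at hr; simp only [List.countP_nil]; omega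
  | cons a t ih =>
    cases r with
    | zero =>
      rw [List.countP_eq_zero]
      intro y hy
      obtain ⟨j, hj, rfl⟩ := List.mem_iff_getElem.mp hy
      simpa using (h j hj)
    | succ r' =>
      have ha : p a := by
        have := h 0 (by simp)
        simpa using this
      have hrec := ih r' (by simp at hr; omega) (fun j hj => by
        have := h (j+1) (by simp; omega)
        simpa [Nat.succ_lt_succ_iff] using this)
      simp [ha, hrec]

theorem bisectLeft_count (xs : List Int) (x : Int) :
    PySem.List.bisectLeft (PySem.List.sorted xs (fun y => y) false) x
      = xs.countP (fun y => decide (y < x)) := by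
  set s := PySem.List.sorted xs (fun y => y) false with hs
  have hpw : s.Pairwise (· ≤ ·) := by
    have := PySem.List.sorted_pairwise xs (fun y => y) -- check name/args
    simpa [hs] using this
  obtain ⟨h1, h2, h3⟩ := PySem.List.bisectLeft_spec s x hpw
  have hperm : s.Perm xs := PySem.List.sorted_perm xs (fun y => y) false
  rw [← hperm.countP_eq]
  refine (countP_prefix (p := fun y => decide (y < x)) s _ h1 (fun j hj => by
    constructor
    · intro hp
      by_contra hlt
      have := h3 j hj (by omega)
      simp at hp; omega
    · intro hlt
      have := h2 j hj hlt
      simpa using this)).symm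

theorem bisectRight_count (xs : List Int) (x : Int) :
    PySem.List.bisectRight (PySem.List.sorted xs (fun y => y) false) x
      = xs.countP (fun y => decide (y ≤ x)) := by
  set s := PySem.List.sorted xs (fun y => y) false with hs
  have hpw : s.Pairwise (· ≤ ·) := by
    have := PySem.List.sorted_pairwise xs (fun y => y)
    simpa [hs] using this
  obtain ⟨h1, h2, h3⟩ := PySem.List.bisectRight_spec s x hpw
  have hperm : s.Perm xs := PySem.List.sorted_perm xs (fun y => y) false
  rw [← hperm.countP_eq]
  refine (countP_prefix (p := fun y => decide (y ≤ x)) s _ h1 (fun j hj => by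
    constructor
    · intro hp
      by_contra hlt
      have := h3 j hj (by omega)
      simp at hp; omega
    · intro hlt
      have := h2 j hj hlt
      simpa using this)).symm

theorem split_count (input : List (List Int)) (x : Int) :
    input.countP (fun r => decide (pvGetI r 0 < pvGetI r 1) && decide (pvGetI r 0 < x))
      = input.countP (fun r => decide (pvGetI r 0 < pvGetI r 1) && decide (pvGetI r 1 ≤ x)) + pvC input x := by
  induction input with
  | nil => simp [pvC]
  | cons r t ih =>
    simp only [pvC, List.countP_cons] at *
    by_cases h1 : pvGetI r 0 < pvGetI r 1 <;>
      by_cases h2 : pvGetI r 0 < x <;>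
        by_cases h3 : pvGetI r 1 ≤ x <;>
          by_cases h4 : x < pvGetI r 1 <;>
            simp [h1, h2, h3, h4] <;> omega

theorem foldl_two_max (f : Int → Int) (l : List (List Int)) (init : Int) :
    (l.flatMap (fun r => [pvGetI r 0, pvGetI r 1])).foldl (fun m x => max m (f x)) init
      = l.foldl (fun m r => max (max m (f (pvGetI r 0))) (f (pvGetI r 1))) init := by
  induction l generalizing init with
  | nil => rfl
  | cons r t ih => simp [List.flatMap_cons, ih]

theorem alt_eq (input : List (List Int)) : solution_alt input = 1 + pvBig input := by
  unfold solution_alt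
  have hdiff : ∀ x : Int,
      ((PySem.List.bisectLeft (PySem.List.sorted ((input.filter (fun r => pvGetI r 0 < pvGetI r 1)).map (fun r => pvGetI r 0)) (fun x => x) false) x : Nat) : Int)
        - ((PySem.List.bisectRight (PySem.List.sorted ((input.filter (fun r => pvGetI r 0 < pvGetI r 1)).map (fun r => pvGetI r 1)) (fun x => x) false) x : Nat) : Int)
      = (pvC input x : Int) := by
    intro x
    rw [bisectLeft_count, bisectRight_count, List.countP_map, List.countP_map,
        List.countP_filter, List.countP_filter]
    have e1 : (fun a => ((fun y => decide (y < x)) ∘ fun r => pvGetI r 0) a && decide (pvGetI a 0 < pvGetI a 1))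
        = (fun r => decide (pvGetI r 0 < pvGetI r 1) && decide (pvGetI r 0 < x)) := by
      funext a; simp [Function.comp, Bool.and_comm]
    have e2 : (fun a => ((fun y => decide (y ≤ x)) ∘ fun r => pvGetI r 1) a && decide (pvGetI a 0 < pvGetI a 1))
        = (fun r => decide (pvGetI r 0 < pvGetI r 1) && decide (pvGetI r 1 ≤ x)) := by
      funext a; simp [Function.comp, Bool.and_comm]
    rw [e1, e2, split_count input x]
    push_cast
    ring
  rw [pvBig, pvEnds, foldl_two_max (fun x => ((pvC input x : Nat) : Int)) input 0]
  simp only [List.foldl_cons, List.foldl_nil]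
  have hfun : (fun (best : Int) (r : List Int) =>
        if (PySem.List.bisectLeft (PySem.List.sorted ((input.filter (fun r => pvGetI r 0 < pvGetI r 1)).map (fun r => pvGetI r 0)) (fun x => x) false) (pvGetI r 1) : Int)
              - (PySem.List.bisectRight (PySem.List.sorted ((input.filter (fun r => pvGetI r 0 < pvGetI r 1)).map (fun r => pvGetI r 1)) (fun x => x) false) (pvGetI r 1) : Int)
            > (if (PySem.List.bisectLeft (PySem.List.sorted ((input.filter (fun r => pvGetI r 0 < pvGetI r 1)).map (fun r => pvGetI r 0)) (fun x => x) false) (pvGetI r 0) : Int)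
                  - (PySem.List.bisectRight (PySem.List.sorted ((input.filter (fun r => pvGetI r 0 < pvGetI r 1)).map (fun r => pvGetI r 1)) (fun x => x) false) (pvGetI r 0) : Int)
                > best
              then (PySem.List.bisectLeft (PySem.List.sorted ((input.filter (fun r => pvGetI r 0 < pvGetI r 1)).map (fun r => pvGetI r 0)) (fun x => x) false) (pvGetI r 0) : Int)
                  - (PySem.List.bisectRight (PySem.List.sorted ((input.filter (fun r => pvGetI r 0 < pvGetI r 1)).map (fun r => pvGetI r 1)) (fun x => x) false) (pvGetI r 0) : Int)
              else best)
        then (PySem.List.bisectLeft (PySem.List.sorted ((input.filter (fun r => pvGetI r 0 < pvGetI r 1)).map (fun r => pvGetI r 0)) (fun x => x) false) (pvGetI r 1) : Int)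
            - (PySem.List.bisectRight (PySem.List.sorted ((input.filter (fun r => pvGetI r 0 < pvGetI r 1)).map (fun r => pvGetI r 1)) (fun x => x) false) (pvGetI r 1) : Int)
        else (if (PySem.List.bisectLeft (PySem.List.sorted ((input.filter (fun r => pvGetI r 0 < pvGetI r 1)).map (fun r => pvGetI r 0)) (fun x => x) false) (pvGetI r 0) : Int)
                  - (PySem.List.bisectRight (PySem.List.sorted ((input.filter (fun r => pvGetI r 0 < pvGetI r 1)).map (fun r => pvGetI r 1)) (fun x => x) false) (pvGetI r 0) : Int)
                > best
              then (PySem.List.bisectLeft (PySem.List.sorted ((input.filter (fun r => pvGetI r 0 < pvGetI r 1)).map (fun r => pvGetI r 0)) (fun x => x) false) (pvGetI r 0) : Int)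
                  - (PySem.List.bisectRight (PySem.List.sorted ((input.filter (fun r => pvGetI r 0 < pvGetI r 1)).map (fun r => pvGetI r 1)) (fun x => x) false) (pvGetI r 0) : Int)
              else best))
      = (fun (m : Int) (r : List Int) => max (max m ((pvC input (pvGetI r 0) : Nat) : Int)) ((pvC input (pvGetI r 1) : Nat) : Int)) := by
    funext best r
    rw [hdiff, hdiff]
    omega
  rw [hfun]
  omega

-- inner-loop count predicates
def pvQ (input : List (List Int)) (time : List Int) (i : Int) (k : Int) (j : Int) : Bool :=
  decide (j ≠ i) && decide (pvGetI time k > pvGetI (pvRow input j) 0 ∧ pvGetI time k < pvGetI (pvRow input j) 1)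

-- the inner loop's running counts and the counter length
theorem stepA_counts (input : List (List Int)) (time : List Int) (i : Int)
    (js : List Int) (st : Int × Int × List Int) :
    (js.foldl (pvStepA input time i) st).1 = st.1 + (js.countP (pvQ input time i 0) : Int)
    ∧ (js.foldl (pvStepA input time i) st).2.1 = st.2.1 + (js.countP (pvQ input time i 1) : Int)
    ∧ (js.foldl (pvStepA input time i) st).2.2.length = st.2.2.length := by
  induction js generalizing st with
  | nil => simp
  | cons j t ih =>
    rw [List.foldl_cons]
    obtain ⟨ih1, ih2, ih3⟩ := ih (pvStepA input time i st j)
    refine ⟨?_, ?_, ?_⟩ <;>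
      [rw [ih1, List.countP_cons]; rw [ih2, List.countP_cons]; rw [ih3]] <;>
      by_cases hj : j ≠ i <;>
        by_cases hc1 : pvGetI time 0 > pvGetI (pvRow input j) 0 ∧ pvGetI time 0 < pvGetI (pvRow input j) 1 <;>
          by_cases hc2 : pvGetI time 1 > pvGetI (pvRow input j) 0 ∧ pvGetI time 1 < pvGetI (pvRow input j) 1 <;>
            simp [pvStepA, pvQ, hj, hc1, hc2, PySem.List.length_pySetD] <;> omega

def pvLe (xs ys : List Int) : Prop := xs.length = ys.length ∧ ∀ k : Nat, xs.getD k 0 ≤ ys.getD k 0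

theorem pvLe_refl (xs : List Int) : pvLe xs xs := ⟨rfl, fun _ => le_refl _⟩

theorem pvLe_trans {xs ys zs : List Int} (h1 : pvLe xs ys) (h2 : pvLe ys zs) : pvLe xs zs :=
  ⟨h1.1.trans h2.1, fun k => (h1.2 k).trans (h2.2 k)⟩

theorem pvLe_set (xs : List Int) (j : Int) (hj : 0 ≤ j) (w : Int) :
    pvLe xs (PySem.List.pySetD xs j (max (PySem.List.pyGetD xs j 0) w)) := by
  rw [PySem.List.pySetD_of_nonneg xs _ hj]
  constructor
  · simp
  · intro k
    by_cases hk : j.toNat < xs.length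
    · by_cases he : k = j.toNat
      · subst he
        simp only [List.getD_eq_getElem?_getD]
        rw [List.getElem?_set_self (by omega), List.getElem?_eq_getElem hk]
        have : PySem.List.pyGetD xs j 0 = xs[j.toNat] :=
          PySem.List.pyGetD_eq_getElem xs 0 hj (by omega)
        simp [this]
      · simp only [List.getD_eq_getElem?_getD]
        rw [List.getElem?_set_ne (by omega)]
    · rw [List.set_eq_of_length_le (by omega)]

theorem stepA_mono (input : List (List Int)) (time : List Int) (i : Int)
    (js : List Int) (hjs : ∀ j ∈ js, 0 ≤ j) (st : Int × Int × List Int) :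
    pvLe st.2.2 (js.foldl (pvStepA input time i) st).2.2 := by
  induction js generalizing st with
  | nil => exact pvLe_refl _
  | cons j t ih =>
    rw [List.foldl_cons]
    refine pvLe_trans ?_ (ih (fun j hj => hjs j (List.mem_cons_of_mem _ hj)) _)
    by_cases hj : j ≠ i
    · simp only [pvStepA, if_pos hj]
      exact pvLe_set _ _ (hjs j (List.mem_cons_self)) _
    · simp only [pvStepA, if_neg hj]
      exact pvLe_refl _

theorem stepA_upper (input : List (List Int)) (time : List Int) (i : Int)
    (js : List Int) (hjs : ∀ j ∈ js, 0 ≤ j) (st : Int × Int × List Int) (B : Int) (hB : 0 ≤ B)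
    (h3 : ∀ y ∈ st.2.2, y ≤ B)
    (h1 : st.1 + (js.countP (pvQ input time i 0) : Int) ≤ B)
    (h2 : st.2.1 + (js.countP (pvQ input time i 1) : Int) ≤ B) :
    ∀ y ∈ (js.foldl (pvStepA input time i) st).2.2, y ≤ B := by
  induction js generalizing st with
  | nil => simpa using h3
  | cons j t ih =>
    rw [List.foldl_cons]
    rw [List.countP_cons] at h1
    rw [List.countP_cons] at h2
    refine ih (fun j hj => hjs j (List.mem_cons_of_mem _ hj)) _ ?_ ?_ ?_
    · -- members of the new counter are bounded
      by_cases hj : j ≠ i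
      · simp only [pvStepA, if_pos hj]
        rw [PySem.List.pySetD_of_nonneg _ _ (hjs j List.mem_cons_self)]
        intro y hy
        rcases List.mem_or_eq_of_mem_set hy with hmem | rfl
        · exact h3 y hmem
        · have hold : PySem.List.pyGetD st.2.2 j 0 ≤ B := by
            rcases Option.eq_none_or_eq_some (PySem.List.pyGet? st.2.2 j) with hnone | ⟨v, hv⟩
            · rw [PySem.List.pyGetD_of_none _ _ _ hnone]; exact hB
            · have : PySem.List.pyGetD st.2.2 j 0 ∈ st.2.2 := by
                have := PySem.List.pyGet?_eq_none_iff (xs := st.2.2) (i := j)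
                exact PySem.List.pyGetD_mem _ _ (by
                  by_contra hc
                  rw [← this] at hc
                  simp [hc] at hv)
              exact h3 _ this
          -- the written value
          by_cases hc1 : pvGetI time 0 > pvGetI (pvRow input j) 0 ∧ pvGetI time 0 < pvGetI (pvRow input j) 1 <;>
            by_cases hc2 : pvGetI time 1 > pvGetI (pvRow input j) 0 ∧ pvGetI time 1 < pvGetI (pvRow input j) 1 <;>
              simp [pvQ, hj, hc1, hc2] at h1 h2 ⊢ <;> omega
      · simp only [pvStepA, if_neg hj]
        exact h3
    · by_cases hj : j ≠ i <;>
        by_cases hc1 : pvGetI time 0 > pvGetI (pvRow input j) 0 ∧ pvGetI time 0 < pvGetI (pvRow input j) 1 <;>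
          simp [pvStepA, pvQ, hj, hc1] at h1 ⊢ <;> omega
    · by_cases hj : j ≠ i <;>
        by_cases hc2 : pvGetI time 1 > pvGetI (pvRow input j) 0 ∧ pvGetI time 1 < pvGetI (pvRow input j) 1 <;>
          simp [pvStepA, pvQ, hj, hc2] at h2 ⊢ <;> omega

-- the per-endpoint count over the index range is the containment count over the rows
theorem countP_range_q (input : List (List Int)) (time : List Int) (i : Int) (k : Int)
    (hk : k = 0 ∨ k = 1) (htime : time = pvRow input i) :
    ((PySem.List.pyRange 0 (input.length : Int) 1).countP (pvQ input time i k) : Int)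
      = (input.countP (fun r => decide (pvGetI r 0 < pvGetI time k) && decide (pvGetI time k < pvGetI r 1)) : Int) := by
  have h1 : (PySem.List.pyRange 0 (input.length : Int) 1).countP (pvQ input time i k)
      = (PySem.List.pyRange 0 (input.length : Int) 1).countP
          (fun j => decide (pvGetI (pvRow input j) 0 < pvGetI time k) && decide (pvGetI time k < pvGetI (pvRow input j) 1)) := by
    refine List.countP_congr (fun j hj => ?_)
    by_cases hji : j = i
    · subst hji
      rw [← htime]
      simp [pvQ]
      rcases hk with rfl | rfl <;> omega
    · simp [pvQ, hji]
  rw [h1]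
  have h2 : (PySem.List.pyRange 0 (input.length : Int) 1).countP
        (fun j => decide (pvGetI (pvRow input j) 0 < pvGetI time k) && decide (pvGetI time k < pvGetI (pvRow input j) 1))
      = ((PySem.List.pyRange 0 (input.length : Int) 1).map (fun j => PySem.List.pyGetD input j [])).countP
          (fun r => decide (pvGetI r 0 < pvGetI time k) && decide (pvGetI time k < pvGetI r 1)) := by
    rw [List.countP_map]
    rfl
  rw [h2, PySem.List.map_pyGetD_pyRange_zero']

theorem inner_last (input : List (List Int)) (time : List Int) (i : Int) (counter : List Int)
    (hn : 2 ≤ input.length) (hi0 : 0 ≤ i) (hi1 : i < (input.length : Int))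
    (htime : time = pvRow input i) (hc : counter.length = input.length) :
    ∃ kk : Nat, kk < input.length ∧
      max (1 + (pvC input (pvGetI time 0) : Int)) (1 + (pvC input (pvGetI time 1) : Int))
        ≤ ((PySem.List.pyRange 0 (input.length : Int) 1).foldl (pvStepA input time i) (1, 1, counter)).2.2.getD kk 0 := by
  set nI : Int := (input.length : Int) with hnI
  set last : Int := if i = nI - 1 then nI - 2 else nI - 1 with hlast
  have hlast0 : 0 ≤ last := by rw [hlast]; split <;> omega
  have hlast1 : last + 1 ≤ nI := by rw [hlast]; split <;> omega
  have hlastne : last ≠ i := by rw [hlast]; split <;> omega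
  rw [PySem.List.pyRange_one_append 0 (last + 1) nI (by omega) hlast1, List.foldl_append]
  set mid := (PySem.List.pyRange 0 (last + 1)).foldl (pvStepA input time i) (1, 1, counter) with hmid
  -- counts after [0, last+1) are final
  have hcount0 : ∀ k, k = 0 ∨ k = 1 →
      ((PySem.List.pyRange 0 (last + 1)).countP (pvQ input time i k) : Int) = (pvC input (pvGetI time k) : Int) := by
    intro k hk
    have hsplit : (PySem.List.pyRange 0 nI).countP (pvQ input time i k)
        = (PySem.List.pyRange 0 (last + 1)).countP (pvQ input time i k)
          + (PySem.List.pyRange (last + 1) nI).countP (pvQ input time i k) := by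
      rw [PySem.List.pyRange_one_append 0 (last + 1) nI (by omega) hlast1, List.countP_append]
    have hrest : (PySem.List.pyRange (last + 1) nI).countP (pvQ input time i k) = 0 := by
      rw [List.countP_eq_zero]
      intro j hj
      rw [PySem.List.mem_pyRange_one] at hj
      have : j = i := by rw [hlast] at hj; rcases hj with ⟨hj1, hj2⟩; by_cases hii : i = nI - 1 <;> simp [hii] at hj1 <;> omega
      subst this
      simp [pvQ]
    have hfull := countP_range_q input time i k hk htime
    rw [← hnI] at hfull
    have : ((PySem.List.pyRange 0 (last + 1)).countP (pvQ input time i k) : Int)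
        = ((PySem.List.pyRange 0 nI).countP (pvQ input time i k) : Int) := by
      rw [hsplit, hrest]; push_cast; ring
    rw [this, hfull]
    rfl
  have hm1 : mid.1 = 1 + (pvC input (pvGetI time 0) : Int) := by
    rw [hmid, (stepA_counts input time i _ _).1, hcount0 0 (Or.inl rfl)]
  have hm2 : mid.2.1 = 1 + (pvC input (pvGetI time 1) : Int) := by
    rw [hmid, (stepA_counts input time i _ _).2.1, hcount0 1 (Or.inr rfl)]
  -- the last processed index receives the final running max
  refine ⟨last.toNat, by omega, ?_⟩
  have htail := (stepA_mono input time i (PySem.List.pyRange (last + 1) nI)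
      (fun j hj => by rw [PySem.List.mem_pyRange_one] at hj; omega) mid).2 last.toNat
  refine le_trans ?_ htail
  -- mid.2.2 at last.toNat
  rw [hmid, PySem.List.pyRange_one_succ_right hlast0, List.foldl_append, List.foldl_cons, List.foldl_nil]
  set stp := (PySem.List.pyRange 0 last).foldl (pvStepA input time i) (1, 1, counter) with hstp
  have hlen : stp.2.2.length = input.length := by
    rw [hstp, (stepA_counts input time i _ _).2.2]; exact hc
  have hw : (pvStepA input time i stp last).2.2.getD last.toNat 0
      = max (PySem.List.pyGetD stp.2.2 last 0)
          (max (pvStepA input time i stp last).1 (pvStepA input time i stp last).2.1) := by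
    simp only [pvStepA, if_pos hlastne]
    rw [PySem.List.pySetD_of_nonneg _ _ hlast0, List.getD_eq_getElem?_getD,
        List.getElem?_set_self (by omega)]
    rfl
  -- identify the step's counts with mid's counts
  have hmids : mid = pvStepA input time i stp last := by
    rw [hmid, PySem.List.pyRange_one_succ_right hlast0, List.foldl_append, List.foldl_cons, List.foldl_nil, hstp]
  rw [← hmids] at hw
  rw [← hmids, hw, hm1, hm2]
  exact le_max_right _ _

-- generic outer fold step (what `solution` folds over the enumerate list)
def pvOut (input : List (List Int)) (counter : List Int) (it : Int × List Int) : List Int :=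
  ((PySem.List.pyRange 0 (input.length : Int) 1).foldl (pvStepA input it.2 it.1) (1, 1, counter)).2.2

theorem outer_mono (input : List (List Int)) (its : List (Int × List Int)) (counter : List Int) :
    pvLe counter (its.foldl (pvOut input) counter) := by
  induction its generalizing counter with
  | nil => exact pvLe_refl _
  | cons it t ih =>
    refine pvLe_trans ?_ (ih _)
    show pvLe (((1 : Int), (1 : Int), counter) : Int × Int × List Int).2.2
      ((PySem.List.pyRange 0 (input.length : Int) 1).foldl (pvStepA input it.2 it.1) (1, 1, counter)).2.2
    exact stepA_mono input it.2 it.1 _ (fun j hj => (PySem.List.mem_pyRange_one.mp hj).1) _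

theorem countP_q_le (input : List (List Int)) (time : List Int) (i : Int) (k : Int) :
    ((PySem.List.pyRange 0 (input.length : Int) 1).countP (pvQ input time i k) : Int)
      ≤ ((input.countP (fun r => decide (pvGetI r 0 < pvGetI time k) && decide (pvGetI time k < pvGetI r 1)) : Nat) : Int) := by
  have hle : (PySem.List.pyRange 0 (input.length : Int) 1).countP (pvQ input time i k)
      ≤ (PySem.List.pyRange 0 (input.length : Int) 1).countP
          (fun j => decide (pvGetI (pvRow input j) 0 < pvGetI time k) && decide (pvGetI time k < pvGetI (pvRow input j) 1)) := by
    refine List.countP_mono_left (fun j _ h => ?_)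
    simp [pvQ] at h ⊢
    omega
  have h2 : (PySem.List.pyRange 0 (input.length : Int) 1).countP
        (fun j => decide (pvGetI (pvRow input j) 0 < pvGetI time k) && decide (pvGetI time k < pvGetI (pvRow input j) 1))
      = input.countP (fun r => decide (pvGetI r 0 < pvGetI time k) && decide (pvGetI time k < pvGetI r 1)) := by
    rw [show (PySem.List.pyRange 0 (input.length : Int) 1).countP
        (fun j => decide (pvGetI (pvRow input j) 0 < pvGetI time k) && decide (pvGetI time k < pvGetI (pvRow input j) 1))
      = ((PySem.List.pyRange 0 (input.length : Int) 1).map (fun j => PySem.List.pyGetD input j [])).countP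
          (fun r => decide (pvGetI r 0 < pvGetI time k) && decide (pvGetI time k < pvGetI r 1)) from by rw [List.countP_map]; rfl,
      PySem.List.map_pyGetD_pyRange_zero']
  omega

theorem outer_upper (input : List (List Int)) (its : List (Int × List Int)) (counter : List Int)
    (hmem : ∀ it ∈ its, it.2 ∈ input)
    (hcnt : ∀ y ∈ counter, y ≤ 1 + pvBig input) :
    ∀ y ∈ its.foldl (pvOut input) counter, y ≤ 1 + pvBig input := by
  have hBig0 : 0 ≤ pvBig input := (PySem.List.le_foldl_max_int (pvEnds input) _ 0).1
  induction its generalizing counter with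
  | nil => simpa using hcnt
  | cons it t ih =>
    refine ih _ (fun u hu => hmem u (List.mem_cons_of_mem _ hu)) ?_
    refine stepA_upper input it.2 it.1 _ (fun j hj => (PySem.List.mem_pyRange_one.mp hj).1)
      _ _ (by omega) hcnt ?_ ?_
    · have hb := countP_q_le input it.2 it.1 0
      have hC : ((pvC input (pvGetI it.2 0) : Nat) : Int) ≤ pvBig input := by
        refine (PySem.List.le_foldl_max_int (pvEnds input) (fun x => ((pvC input x : Nat) : Int)) 0).2 _ ?_
        simp only [pvEnds, List.mem_flatMap]
        exact ⟨it.2, hmem it List.mem_cons_self, by simp⟩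
      simp only [pvC] at hC
      have e1 : (((1 : Int), (1 : Int), counter) : Int × Int × List Int).1 = 1 := rfl
      omega
    · have hb := countP_q_le input it.2 it.1 1
      have hC : ((pvC input (pvGetI it.2 1) : Nat) : Int) ≤ pvBig input := by
        refine (PySem.List.le_foldl_max_int (pvEnds input) (fun x => ((pvC input x : Nat) : Int)) 0).2 _ ?_
        simp only [pvEnds, List.mem_flatMap]
        exact ⟨it.2, hmem it List.mem_cons_self, by simp⟩
      simp only [pvC] at hC
      have e2 : (((1 : Int), (1 : Int), counter) : Int × Int × List Int).2.1 = 1 := rfl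
      omega

theorem outer_len (input : List (List Int)) (its : List (Int × List Int)) (counter : List Int) :
    (its.foldl (pvOut input) counter).length = counter.length :=
  (outer_mono input its counter).1.symm

theorem outer_low (input : List (List Int)) (its : List (Int × List Int)) (counter : List Int)
    (hn : 2 ≤ input.length) (hc : counter.length = input.length)
    (hits : ∀ it ∈ its, 0 ≤ it.1 ∧ it.1 < (input.length : Int) ∧ it.2 = pvRow input it.1) :
    ∀ it ∈ its, ∃ kk : Nat, kk < input.length ∧
      max (1 + (pvC input (pvGetI it.2 0) : Int)) (1 + (pvC input (pvGetI it.2 1) : Int))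
        ≤ (its.foldl (pvOut input) counter).getD kk 0 := by
  induction its generalizing counter with
  | nil => intro it h; exact absurd h (List.not_mem_nil)
  | cons u t ih =>
    intro it hit
    rcases List.mem_cons.mp hit with rfl | hmem
    · obtain ⟨h1, h2, h3⟩ := hits it List.mem_cons_self
      obtain ⟨kk, hkk, hval⟩ := inner_last input it.2 it.1 counter hn h1 h2 h3 hc
      refine ⟨kk, hkk, le_trans hval ?_⟩
      rw [List.foldl_cons]
      exact (outer_mono input t (pvOut input counter it)).2 kk
    · rw [List.foldl_cons]
      exact ih (pvOut input counter u)
        (by rw [show (pvOut input counter u).length = counter.length from (stepA_counts input u.2 u.1 _ _).2.2]; exact hc)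
        (fun v hv => hits v (List.mem_cons_of_mem _ hv)) it hmem

theorem foldl_max_le (l : List Int) (f : Int → Int) (a b : Int) (ha : a ≤ b)
    (h : ∀ x ∈ l, f x ≤ b) : l.foldl (fun m x => max m (f x)) a ≤ b := by
  induction l generalizing a with
  | nil => simpa using ha
  | cons x t ih =>
    rw [List.foldl_cons]
    exact ih _ (max_le ha (h x List.mem_cons_self)) (fun y hy => h y (List.mem_cons_of_mem _ hy))

theorem enum_facts (input : List (List Int)) :
    ∀ it ∈ PySem.List.enumerate input 0, 0 ≤ it.1 ∧ it.1 < (input.length : Int) ∧ it.2 = pvRow input it.1 ∧ it.2 ∈ input := by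
  intro it hit
  obtain ⟨k, hk, rfl⟩ := (PySem.List.mem_enumerate_iff input 0 it).mp hit
  refine ⟨by omega, by simpa using hk, ?_, List.getElem_mem hk⟩
  show input[k] = pvRow input (0 + (k : Int))
  rw [pvRow, show (0 + (k : Int)) = ((k : Nat) : Int) by omega, PySem.List.pyGetD_natCast,
      List.getD_eq_getElem?_getD, List.getElem?_eq_getElem hk]
  rfl

theorem a_eq (input : List (List Int)) (h : input ≠ []) : solution input = 1 + pvBig input := by
  have hn1 : 0 < input.length := List.length_pos_of_ne_nil h
  have hBig0 : 0 ≤ pvBig input := (PySem.List.le_foldl_max_int (pvEnds input) _ 0).1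
  by_cases hn2 : 2 ≤ input.length
  · -- general case
    have hsol : solution input
        = (PySem.List.max? ((PySem.List.enumerate input 0).foldl (pvOut input) (List.replicate input.length 1)) (fun y => y)).getD 0 := rfl
    set counterF := (PySem.List.enumerate input 0).foldl (pvOut input) (List.replicate input.length 1) with hF
    have hlenF : counterF.length = input.length := by
      rw [hF, outer_len]; simp
    rcases hcF : counterF with _ | ⟨c, rest⟩
    · rw [hcF] at hlenF; simp at hlenF; omega
    set m := rest.foldl max c with hm
    have hsolm : solution input = m := by
      rw [hsol, hcF, PySem.List.max?_id_cons]; rfl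
    have hmem_m : m ∈ counterF := by
      rw [hcF]
      rcases PySem.List.foldl_max_mem rest c with he | hmem
      · rw [hm, he]; exact List.mem_cons_self
      · exact List.mem_cons_of_mem _ (hm ▸ hmem)
    have hup : ∀ y ∈ counterF, y ≤ 1 + pvBig input := by
      rw [hF]
      refine outer_upper input _ _ (fun it hit => (enum_facts input it hit).2.2.2) ?_
      intro y hy
      rw [List.eq_of_mem_replicate hy]
      omega
    have hmle : m ≤ 1 + pvBig input := hup m hmem_m
    have hmax_mem : ∀ y ∈ counterF, y ≤ m := by
      rw [hcF]
      intro y hy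
      rcases List.mem_cons.mp hy with rfl | hy
      · exact (PySem.List.le_foldl_max rest y).1
      · exact (PySem.List.le_foldl_max rest c).2 y hy
    have h1m : 1 ≤ m := by
      have := (outer_mono input (PySem.List.enumerate input 0) (List.replicate input.length 1)).2 0
      rw [← hF] at this
      have h01 : (List.replicate input.length (1 : Int)).getD 0 0 = 1 := by
        rw [List.getD_eq_getElem?_getD, List.getElem?_replicate]
        simp [hn1]
      have hc0 : counterF.getD 0 0 = c := by rw [hcF]; rfl
      have := hmax_mem c (by rw [hcF]; exact List.mem_cons_self)
      omega
    have hlow : ∀ x ∈ pvEnds input, ((pvC input x : Nat) : Int) ≤ m - 1 := by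
      intro x hx
      rw [pvEnds, List.mem_flatMap] at hx
      obtain ⟨r, hr, hxr⟩ := hx
      obtain ⟨k, hk, rfl⟩ := List.mem_iff_getElem.mp hr
      have hitmem : ((0 : Int) + (k : Int), input[k]) ∈ PySem.List.enumerate input 0 :=
        (PySem.List.mem_enumerate_iff input 0 _).mpr ⟨k, hk, rfl⟩
      obtain ⟨kk, hkk, hval⟩ := outer_low input (PySem.List.enumerate input 0)
        (List.replicate input.length 1) hn2 (by simp)
        (fun it hit => ⟨(enum_facts input it hit).1, (enum_facts input it hit).2.1, (enum_facts input it hit).2.2.1⟩)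
        _ hitmem
      rw [← hF] at hval
      have hin : counterF.getD kk 0 ∈ counterF := by
        rw [List.getD_eq_getElem?_getD, List.getElem?_eq_getElem (by omega)]
        exact List.getElem_mem _
      have hlem := hmax_mem _ hin
      simp only at hval
      simp only [List.mem_cons, List.not_mem_nil, or_false] at hxr
      rcases hxr with rfl | rfl <;> omega
    have hbig_le : pvBig input ≤ m - 1 :=
      foldl_max_le _ _ 0 (m - 1) (by omega) hlow
    omega
  · -- singleton list
    have hn : input.length = 1 := by omega
    obtain ⟨r, rfl⟩ := List.length_eq_one_iff.mp hn
    have hsol : solution [r] = 1 := by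
      rw [solution]
      simp only [PySem.List.enumerate, List.length_cons, List.length_nil]
      norm_num
      rw [show PySem.List.pyRange 0 1 = [0] from by
        rw [PySem.List.pyRange_one_cons (by norm_num : (0 : Int) < 1),
            PySem.List.pyRange_one_eq_nil (by norm_num : (1 : Int) ≤ 0 + 1)]]
      simp [pvStepA, PySem.List.max?_id_cons]
    have hC0 : pvC [r] (pvGetI r 0) = 0 := by
      simp [pvC]
    have hC1 : pvC [r] (pvGetI r 1) = 0 := by
      simp [pvC]
    rw [hsol, pvBig, pvEnds]
    simp [hC0, hC1]

-- ===== VERDICT (by name: the statement is the Claim_ definition above) =====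
theorem solution_spec : Claim_equal_solution := by
  intro input _ hpre
  unfold Spec_solution
  rw [a_eq input hpre.1, alt_eq]
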